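-- pv_equiv track=rewrite | github.com/TSTanabe/HMSS2 | scripts/Csb_cluster.py | find_reverse_pairs
-- ===== SOURCE A (Python) =====
-- def find_reverse_pairs(my_dict):
--     reverse_pairs = []
--     seen = set()  # Um Duplikate zu vermeiden
--
--     for key in my_dict.keys():
--         reversed_key = key[::-1]  # Erzeuge das Revers-Tupel
--
--         # Überprüfe, ob das Revers in den Keys ist und das Paar noch nicht überprüft wurde
--         if reversed_key in my_dict and reversed_key not in seen:
--             reverse_pairs.append((key, reversed_key))
--             seen.add(key)  # Füge das Paar zu "gesehenen" hinzu
--             seen.add(reversed_key)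
--
--     return reverse_pairs
-- ===== SOURCE B (Python) =====
-- def find_reverse_pairs(my_dict):
--     # Group keys by the canonical id of the unordered {key, reversed-key} class
--     # (built in one pass), then emit each class's first key whose reverse is present.
--     first = {}
--     for k in my_dict:
--         c = min(k, k[::-1])
--         if c not in first:
--             first[c] = k
--     return [(k, k[::-1]) for k in first.values() if k[::-1] in my_dict]
-- ===== Notes on version B (the rewrite author's own statement) =====
-- stated objective: alternative
-- what changed: Replaced A's single-pass seen-set dedup with a canonical-class grouping: one pass builds a dict mapping each unordered {key, reversed-key} class's canonical id (min of the two tuples) to its first key, then a second pass emits (k, k[::-1]) for each class representative whose reverse is a key.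
import Mathlib
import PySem

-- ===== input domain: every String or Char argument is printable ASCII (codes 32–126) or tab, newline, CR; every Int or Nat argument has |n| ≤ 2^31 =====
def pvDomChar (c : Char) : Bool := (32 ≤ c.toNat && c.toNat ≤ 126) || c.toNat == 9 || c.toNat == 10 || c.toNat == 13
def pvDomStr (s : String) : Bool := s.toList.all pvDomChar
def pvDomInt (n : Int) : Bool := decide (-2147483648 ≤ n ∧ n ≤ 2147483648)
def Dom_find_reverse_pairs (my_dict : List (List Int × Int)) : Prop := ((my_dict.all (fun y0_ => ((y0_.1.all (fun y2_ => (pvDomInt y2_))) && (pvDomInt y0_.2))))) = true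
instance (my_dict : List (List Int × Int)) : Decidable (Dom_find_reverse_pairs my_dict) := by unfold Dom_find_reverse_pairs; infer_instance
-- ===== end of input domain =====

-- B replaces A's seen-set dedup loop by canonical-class grouping: one pass builds a
-- dict from each unordered {key, reversed-key} class's canonical id (min of the two
-- tuples) to its first key, a second pass emits the representatives whose reverse is
-- a key (objective: alternative, same cost).

-- ===== PORT A =====
-- the for-loop over my_dict.keys() with accumulators (reverse_pairs, seen), as structural recursion
def find_reverse_pairs_loop (d : PySem.Dict (List Int) Int) :
    List (List Int) → List (List Int × List Int) → PySem.Set (List Int) → List (List Int × List Int)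
  | [], acc, _ => acc
  | k :: rest, acc, seen =>
    let r := (PySem.List.slice? k none none (-1)).getD []   -- key[::-1]; step -1 never raises
    if d.contains r && !(seen.contains r) then
      find_reverse_pairs_loop d rest (acc ++ [(k, r)]) ((seen.add k).add r)
    else
      find_reverse_pairs_loop d rest acc seen

def find_reverse_pairs (my_dict : List (List Int × Int)) : List (List Int × List Int) :=
  find_reverse_pairs_loop (PySem.Dict.mk my_dict) (my_dict.map Prod.fst) [] PySem.Set.empty

-- ===== PORT B =====
-- Python's `<=` on int tuples (lexicographic)
def pyTupleLe : List Int → List Int → Bool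
  | [], _ => true
  | _ :: _, [] => false
  | a :: as, b :: bs => if a < b then true else if b < a then false else pyTupleLe as bs

-- Python's min(a, b) on int tuples
def pyMin2 (a b : List Int) : List Int := if pyTupleLe a b then a else b

def find_reverse_pairs_alt (my_dict : List (List Int × Int)) : List (List Int × List Int) :=
  -- pass 1: first = {} ; for k in my_dict: c = min(k, k[::-1]); if c not in first: first[c] = k
  -- pass 2: [(k, k[::-1]) for k in first.values() if k[::-1] in my_dict]
  (((my_dict.map Prod.fst).foldl
    (fun d k =>
      let c := pyMin2 k ((PySem.List.slice? k none none (-1)).getD [])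
      if d.contains c then d else d.insert c k)
    PySem.Dict.empty).values).foldl
    (fun out k =>
      let r := (PySem.List.slice? k none none (-1)).getD []
      if (PySem.Dict.mk my_dict).contains r then out ++ [(k, r)] else out) []

-- ===== PRECONDITION & SPEC =====
-- The association list stands for a Python dict, whose keys are unique by construction;
-- Pre_ states exactly that, so it excludes no input the Python function can receive.
def Pre_find_reverse_pairs (my_dict : List (List Int × Int)) : Prop :=
  (my_dict.map Prod.fst).Nodup
instance (my_dict : List (List Int × Int)) : Decidable (Pre_find_reverse_pairs my_dict) := by
  unfold Pre_find_reverse_pairs; infer_instance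

def pvWitness_find_reverse_pairs : (List (List Int × Int)) := [([1, 2], 0), ([2, 1], 5), ([3], 7)]

def Spec_find_reverse_pairs (my_dict : List (List Int × Int)) (out : List (List Int × List Int)) : Prop := out = find_reverse_pairs_alt my_dict
instance (my_dict : List (List Int × Int)) (out : List (List Int × List Int)) : Decidable (Spec_find_reverse_pairs my_dict out) := by unfold Spec_find_reverse_pairs; infer_instance

-- ===== CLAIM (what is proved, stated in full; the proofs are below) =====
def Claim_equal_find_reverse_pairs : Prop := ∀ (my_dict : List (List Int × Int)), Dom_find_reverse_pairs my_dict → Pre_find_reverse_pairs my_dict → Spec_find_reverse_pairs my_dict (find_reverse_pairs my_dict)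

-- ===== LEMMAS AND PROOFS =====

-- k[::-1] is List.reverse
lemma slice_rev (k : List Int) : (PySem.List.slice? k none none (-1)).getD [] = k.reverse := by
  rw [PySem.List.slice?_none_none_neg_one]; rfl

-- canonical id of the unordered class {k, k.reverse}
def canon (k : List Int) : List Int := pyMin2 k k.reverse

lemma pyTupleLe_total (a b : List Int) (h : pyTupleLe a b = false) : pyTupleLe b a = true := by
  induction a generalizing b with
  | nil => simp [pyTupleLe] at h
  | cons x xs ih =>
    cases b with
    | nil => simp [pyTupleLe]
    | cons y ys =>
      simp only [pyTupleLe] at h ⊢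
      split_ifs at h ⊢ <;> first | rfl | omega | exact ih ys h

lemma pyTupleLe_antisymm (a b : List Int) (h1 : pyTupleLe a b = true) (h2 : pyTupleLe b a = true) :
    a = b := by
  induction a generalizing b with
  | nil => cases b with | nil => rfl | cons y ys => simp [pyTupleLe] at h2
  | cons x xs ih =>
    cases b with
    | nil => simp [pyTupleLe] at h1
    | cons y ys =>
      simp only [pyTupleLe] at h1 h2
      split_ifs at h1 h2 <;> first | omega | (rw [ih ys h1 h2]; congr 1; omega)

lemma canon_mem (k : List Int) : canon k = k ∨ canon k = k.reverse := by
  unfold canon pyMin2; split_ifs <;> simp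

lemma canon_reverse (k : List Int) : canon k.reverse = canon k := by
  unfold canon pyMin2
  rw [List.reverse_reverse]
  by_cases h1 : pyTupleLe k k.reverse = true
  · by_cases h2 : pyTupleLe k.reverse k = true
    · simp [pyTupleLe_antisymm _ _ h2 h1]
    · simp [h1, h2]
  · have h2 := pyTupleLe_total _ _ (Bool.not_eq_true _ ▸ h1)
    simp [h1, h2]

lemma canon_eq_iff (j k : List Int) : canon j = canon k ↔ j = k ∨ j = k.reverse := by
  constructor
  · intro h
    rcases canon_mem j with hj | hj <;> rcases canon_mem k with hk | hk <;>
      rw [hj] at h <;> rw [hk] at h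
    · exact Or.inl h
    · exact Or.inr h
    · exact Or.inr (by rw [← h, List.reverse_reverse])
    · exact Or.inl (List.reverse_injective h)
  · rintro (rfl | rfl)
    · rfl
    · exact canon_reverse k

/-- The surviving keys: while scanning `rest` after having scanned `pref`, keep `k`
exactly when neither `k` nor `k.reverse` has occurred before. -/
def bKeep : List (List Int) → List (List Int) → List (List Int)
  | _, [] => []
  | pref, k :: rest =>
    if k ∈ pref ∨ k.reverse ∈ pref then bKeep (pref ++ [k]) rest
    else k :: bKeep (pref ++ [k]) rest

-- A's loop invariant: `seen` holds exactly the keys of already-emitted mutual-reverse pairs.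
def seenInv (keys pref : List (List Int)) (seen : PySem.Set (List Int)) : Prop :=
  ∀ x : List Int, x ∈ seen ↔ ((x ∈ pref ∧ x.reverse ∈ keys) ∨ (x.reverse ∈ pref ∧ x ∈ keys))

lemma contains_mk_iff (my_dict : List (List Int × Int)) (r : List Int) :
    (PySem.Dict.mk my_dict).contains r = true ↔ r ∈ my_dict.map Prod.fst := by
  simp [PySem.Dict.contains_mk, List.any_eq_true, List.mem_map]

/-- A's loop produces exactly the kept keys paired with their reverses, filtered by
"the reverse is itself a key". -/
lemma loopA_eq (my_dict : List (List Int × Int)) (hnd : (my_dict.map Prod.fst).Nodup) :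
    ∀ (rest pref : List (List Int)) (acc : List (List Int × List Int)) (seen : PySem.Set (List Int)),
    my_dict.map Prod.fst = pref ++ rest →
    seenInv (my_dict.map Prod.fst) pref seen →
    find_reverse_pairs_loop (PySem.Dict.mk my_dict) rest acc seen
      = acc ++ ((bKeep pref rest).filter
          (fun k => (PySem.Dict.mk my_dict).contains k.reverse)).map (fun k => (k, k.reverse)) := by
  intro rest
  induction rest with
  | nil =>
    intro pref acc seen _ _
    simp [find_reverse_pairs_loop, bKeep]
  | cons k rest' ih =>
    intro pref acc seen hk hinv
    have hksplit : my_dict.map Prod.fst = (pref ++ [k]) ++ rest' := by rw [hk]; simp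
    have hkmem : k ∈ my_dict.map Prod.fst := by rw [hk]; simp
    have hknotpref : k ∉ pref := by
      have hnd' := hnd
      rw [hk] at hnd'
      rcases List.nodup_append.mp hnd' with ⟨_, _, hdisj⟩
      intro hkp
      exact hdisj k hkp k (by simp) rfl
    have hstep : ∀ x : List Int, x ≠ k → x ≠ k.reverse →
        (((x ∈ pref ∧ x.reverse ∈ my_dict.map Prod.fst) ∨
          (x.reverse ∈ pref ∧ x ∈ my_dict.map Prod.fst)) ↔
         ((x ∈ pref ++ [k] ∧ x.reverse ∈ my_dict.map Prod.fst) ∨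
          (x.reverse ∈ pref ++ [k] ∧ x ∈ my_dict.map Prod.fst))) := by
      intro x hxk hxr
      have hrx : x.reverse ≠ k := by
        intro h; exact hxr (by rw [← h, List.reverse_reverse])
      simp only [List.mem_append, List.mem_singleton]
      tauto
    by_cases hd : (PySem.Dict.mk my_dict).contains k.reverse = true
    · -- reversed key is among the keys
      have hrkeys : k.reverse ∈ my_dict.map Prod.fst := (contains_mk_iff _ _).mp hd
      have hseen_iff : k.reverse ∈ seen ↔ k.reverse ∈ pref := by
        rw [hinv k.reverse]
        constructor
        · rintro (⟨h, _⟩ | ⟨h, _⟩)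
          · exact h
          · rw [List.reverse_reverse] at h; exact absurd h hknotpref
        · intro h; exact Or.inl ⟨h, by rw [List.reverse_reverse]; exact hkmem⟩
      by_cases hs : k.reverse ∈ pref
      · -- already paired earlier: both sides skip
        have hseen : seen.contains k.reverse = true :=
          (PySem.Set.contains_iff _ _).mpr (hseen_iff.mpr hs)
        have hinv' : seenInv (my_dict.map Prod.fst) (pref ++ [k]) seen := by
          intro x
          rw [hinv x]
          by_cases hxk : x = k
          · subst hxk; simp only [List.mem_append, List.mem_singleton]; tauto
          · by_cases hxr : x = k.reverse
            · subst hxr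
              simp only [List.reverse_reverse, List.mem_append, List.mem_singleton]; tauto
            · exact hstep x hxk hxr
        rw [find_reverse_pairs_loop]
        simp only [slice_rev, hd, hseen, Bool.not_true, Bool.and_false, Bool.false_eq_true,
          if_false, bKeep, hs, or_true, if_true]
        exact ih (pref ++ [k]) acc seen hksplit hinv'
      · -- new pair: both sides emit (k, k.reverse)
        have hseen : seen.contains k.reverse = false := by
          rw [← Bool.not_eq_true, PySem.Set.contains_iff]
          rw [hseen_iff]; exact hs
        have hinv' : seenInv (my_dict.map Prod.fst) (pref ++ [k]) ((seen.add k).add k.reverse) := by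
          intro x
          rw [PySem.Set.mem_add, PySem.Set.mem_add, hinv x]
          by_cases hxk : x = k
          · subst hxk; simp only [List.mem_append, List.mem_singleton]; tauto
          · by_cases hxr : x = k.reverse
            · subst hxr
              simp only [List.reverse_reverse, List.mem_append, List.mem_singleton]; tauto
            · rw [hstep x hxk hxr]; tauto
        rw [find_reverse_pairs_loop]
        simp only [slice_rev, hd, hseen, Bool.not_false, Bool.and_true, if_true, bKeep]
        rw [if_neg (by tauto)]
        rw [ih (pref ++ [k]) (acc ++ [(k, k.reverse)]) ((seen.add k).add k.reverse) hksplit hinv']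
        rw [List.filter_cons, if_pos hd]
        simp
    · -- reversed key not among keys: A skips; bKeep keeps k but the filter drops it
      have hrn : k.reverse ∉ my_dict.map Prod.fst := fun h => hd ((contains_mk_iff _ _).mpr h)
      have hrpref : k.reverse ∉ pref := by
        intro h
        exact hd ((contains_mk_iff _ _).mpr (by rw [hk]; exact List.mem_append_left _ h))
      have hd' : (PySem.Dict.mk my_dict).contains k.reverse = false := by
        rw [← Bool.not_eq_true]; exact hd
      have hinv' : seenInv (my_dict.map Prod.fst) (pref ++ [k]) seen := by
        intro x
        rw [hinv x]
        by_cases hxk : x = k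
        · subst hxk
          have hne : ¬ x.reverse = x := fun h => hrn (by rw [h]; exact hkmem)
          simp only [List.mem_append, List.mem_singleton]; tauto
        · by_cases hxr : x = k.reverse
          · subst hxr
            simp only [List.reverse_reverse, List.mem_append, List.mem_singleton]; tauto
          · exact hstep x hxk hxr
      rw [find_reverse_pairs_loop]
      simp only [slice_rev, hd', Bool.false_and, Bool.false_eq_true, if_false, bKeep]
      rw [if_neg (by tauto)]
      rw [ih (pref ++ [k]) acc seen hksplit hinv']
      rw [List.filter_cons, if_neg (by simp [hd'])]

/-- B's first pass: the values of the canonical-id dict are exactly the kept keys. -/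
lemma pass1_values (keys : List (List Int)) :
    ∀ (rest pref : List (List Int)) (d : PySem.Dict (List Int) (List Int)),
    keys = pref ++ rest →
    (∀ j : List Int, d.contains (canon j) = decide (j ∈ pref ∨ j.reverse ∈ pref)) →
    (rest.foldl
      (fun d k =>
        let c := pyMin2 k ((PySem.List.slice? k none none (-1)).getD [])
        if d.contains c then d else d.insert c k) d).values
      = d.values ++ bKeep pref rest := by
  intro rest
  induction rest with
  | nil => intro pref d _ _; simp [bKeep]
  | cons k rest' ih =>
    intro pref d hk hinv
    have hksplit : keys = (pref ++ [k]) ++ rest' := by rw [hk]; simp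
    have hc : pyMin2 k ((PySem.List.slice? k none none (-1)).getD []) = canon k := by
      rw [slice_rev]; rfl
    have hcontains : d.contains (canon k) = decide (k ∈ pref ∨ k.reverse ∈ pref) := hinv k
    have hinvstep : ∀ j : List Int,
        (j ∈ pref ++ [k] ∨ j.reverse ∈ pref ++ [k])
          ↔ (canon j = canon k ∨ (j ∈ pref ∨ j.reverse ∈ pref)) := by
      intro j
      rw [canon_eq_iff]
      have h2 : j.reverse = k ↔ j = k.reverse := by
        constructor
        · intro h; rw [← h, List.reverse_reverse]
        · intro h; rw [h, List.reverse_reverse]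
      simp only [List.mem_append, List.mem_singleton, h2]
      tauto
    simp only [List.foldl_cons, hc, hcontains]
    by_cases hmem : k ∈ pref ∨ k.reverse ∈ pref
    · -- class already represented: dict unchanged, bKeep skips
      rw [if_pos (by simpa using hmem)]
      rw [ih (pref ++ [k]) d hksplit ?_]
      · simp [bKeep, if_pos hmem]
      · intro j
        rw [hinv j, decide_eq_decide, hinvstep j]
        constructor
        · exact fun h => Or.inr h
        · rintro (hc | h)
          · rcases (canon_eq_iff j k).mp hc with rfl | rfl
            · exact hmem
            · rw [List.reverse_reverse]; tauto
          · exact h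
    · -- new class: insert appends the value, bKeep keeps k
      rw [if_neg (by simpa using hmem)]
      have hnotc : d.contains (canon k) = false := by rw [hcontains]; simpa using hmem
      rw [ih (pref ++ [k]) (d.insert (canon k) k) hksplit ?_]
      · have hitems : (d.insert (canon k) k).items = d.items ++ [(canon k, k)] :=
          PySem.Dict.items_insert_of_not_contains _ _ hnotc
        simp only [PySem.Dict.values, hitems, List.map_append, List.map_cons, List.map_nil,
          bKeep, if_neg hmem]
        simp
      · intro j
        rw [PySem.Dict.contains_insert, hinv j]
        by_cases hcj : canon j = canon k
        · rw [beq_iff_eq.mpr hcj, Bool.true_or]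
          exact (decide_eq_true ((hinvstep j).mpr (Or.inl hcj))).symm
        · have hiff : (j ∈ pref ++ [k] ∨ j.reverse ∈ pref ++ [k]) ↔ (j ∈ pref ∨ j.reverse ∈ pref) := by
            rw [hinvstep j]; tauto
          rw [beq_eq_false_iff_ne.mpr hcj, Bool.false_or, decide_eq_decide]
          exact hiff.symm

-- ===== VERDICT (by name: the statement is the Claim_ definition above) =====
theorem find_reverse_pairs_spec : Claim_equal_find_reverse_pairs := by
  intro my_dict _ hpre
  unfold Spec_find_reverse_pairs find_reverse_pairs find_reverse_pairs_alt
  rw [loopA_eq my_dict hpre (my_dict.map Prod.fst) [] [] PySem.Set.empty (by simp)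
      (by intro x; simp [PySem.Set.empty])]
  rw [pass1_values (my_dict.map Prod.fst) (my_dict.map Prod.fst) [] PySem.Dict.empty
      (by simp) (by intro j; simp [PySem.Dict.contains_empty])]
  simp only [show (PySem.Dict.empty : PySem.Dict (List Int) (List Int)).values = [] from rfl,
    List.nil_append, slice_rev]
  rw [PySem.List.foldl_append_if
      (fun k : List Int => (PySem.Dict.mk my_dict).contains k.reverse)
      (fun k : List Int => (k, k.reverse))]
  simp
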